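-- pv_equiv track=rewrite | github.com/SaminJafarpour/PythonProject | Q11.py | func
-- ===== SOURCE A (Python) =====
-- def func(dies):
--   result=0
--   ####### add your code below #######
--
--   if dies[0]==dies[1] and dies[1]==dies[2]:
--     prize=100+dies[0]*10
--     result=prize
--
--   elif dies[0]==dies[1] or dies[0]==dies[2] or dies[1]==dies[2]:
--       for i in dies:
--         for j in dies:
--           if i==j:
--
--             prize=10+i*10
--             result=prize
--   else:
--     largest=dies[0]
--     for die in dies:
--       if die>largest:
--         largest=die
--     prize=largest*1
--     result=prize
--   ####### add your code above #######
--   return result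
-- ===== SOURCE B (Python) =====
-- def func(dies):
--     # Dispatch on the number of distinct values among the three dice instead of
--     # pairwise branching; the pair prize uses the PAIRED die's value (A's nested
--     # loop accidentally uses the last die instead -- see D_ in the claim).
--     k = len({dies[0], dies[1], dies[2]})
--     if k == 1:
--         return 100 + 10 * dies[0]
--     if k == 2:
--         pair = dies[0] if dies[0] in (dies[1], dies[2]) else dies[1]
--         return 10 + 10 * pair
--     return max(dies)
-- ===== Notes on version B (the rewrite author's own statement) =====
-- stated objective: simpler
-- what changed: Dispatches on the cardinality of the set of the three dice instead of pairwise-comparison branches with loops; the nested pair-scan and the manual max loop are gone, and the pair prize is computed from the paired die's value.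
-- intended difference: On lists whose first three entries contain exactly one matched pair whose value differs from the last list element, A's nested loop (which compares every die with itself) returns 10+10*(last element) while B returns 10+10*(the paired value), which is the prize the pair branch evidently intends. — e.g. on func([2, 2, 3]): A returns 40, B returns 30
import Mathlib
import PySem

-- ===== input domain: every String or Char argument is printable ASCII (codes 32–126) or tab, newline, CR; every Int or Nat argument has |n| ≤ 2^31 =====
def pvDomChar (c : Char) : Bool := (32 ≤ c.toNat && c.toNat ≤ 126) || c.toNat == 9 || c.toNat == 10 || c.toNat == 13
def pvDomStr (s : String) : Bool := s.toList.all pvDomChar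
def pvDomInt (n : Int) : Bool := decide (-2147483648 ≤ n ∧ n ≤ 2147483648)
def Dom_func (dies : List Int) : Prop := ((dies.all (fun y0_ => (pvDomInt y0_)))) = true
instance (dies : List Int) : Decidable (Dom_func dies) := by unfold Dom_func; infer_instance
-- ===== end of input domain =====

-- B dispatches on the cardinality of the set of the three dice (no pairwise branches,
-- no loops) and fixes the pair prize to use the paired die's value; objective: simpler.

-- ===== PORT A =====
-- literal port of A: three indexings, then either the triple prize, the nested
-- pair-scan loop folding over the same `result` state, or the running-max loop.
def func (dies : List Int) : Int :=
  match PySem.List.pyGet? dies 0, PySem.List.pyGet? dies 1, PySem.List.pyGet? dies 2 with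
  | some d0, some d1, some d2 =>
    if d0 = d1 ∧ d1 = d2 then
      100 + d0 * 10
    else if d0 = d1 ∨ d0 = d2 ∨ d1 = d2 then
      dies.foldl (fun result i =>
        dies.foldl (fun result j =>
          if i = j then 10 + i * 10 else result) result) 0
    else
      (dies.foldl (fun largest die => if die > largest then die else largest) d0) * 1
  | _, _, _ => 0  -- IndexError in Python; excluded by Pre_func

-- ===== PORT B =====
def func_alt (dies : List Int) : Int :=
  match PySem.List.pyGet? dies 0 with
  | none => 0  -- IndexError in Python; excluded by Pre_func
  | some a =>
   match PySem.List.pyGet? dies 1 with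
   | none => 0
   | some b =>
    match PySem.List.pyGet? dies 2 with
    | none => 0
    | some c =>
    let k := PySem.Set.len (PySem.Set.ofList [a, b, c])   -- len({dies[0],dies[1],dies[2]})
    if k = 1 then
      100 + 10 * a
    else if k = 2 then
      let pair := if a = b ∨ a = c then a else b          -- a if a in (b,c) else b
      10 + 10 * pair
    else
      (PySem.List.max? dies (fun x => x)).getD 0          -- max(dies)

-- ===== PRECONDITION & SPEC =====
-- Pre_func excludes exactly the lists of fewer than 3 elements, on which Python A raises IndexError.
def Pre_func (dies : List Int) : Prop := 3 ≤ dies.length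
instance (dies : List Int) : Decidable (Pre_func dies) := by unfold Pre_func; infer_instance
def pvWitness_func : List Int := [1, 2, 3]

-- On lists whose first three entries contain exactly one matched pair whose value differs
-- from the last list element, A's nested loop (comparing every die with itself) returns
-- 10+10*(last element) while B returns 10+10*(the paired value), which is the prize the
-- pair branch evidently intends.
def D_func (dies : List Int) : Prop :=
  3 ≤ dies.length ∧
  (let a := dies.getD 0 0
   let b := dies.getD 1 0
   let c := dies.getD 2 0
   if a = b then b ≠ c ∧ a ≠ dies.getLast?.getD 0
   else (a = c ∨ b = c) ∧ c ≠ dies.getLast?.getD 0)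
instance (dies : List Int) : Decidable (D_func dies) := by unfold D_func; infer_instance

def Spec_func (dies : List Int) (out : Int) : Prop := ¬ D_func dies → out = func_alt dies
instance (dies : List Int) (out : Int) : Decidable (Spec_func dies out) := by unfold Spec_func; infer_instance

def pvDiffWitness_func : List Int := [2, 2, 3]
def pvDiffWitnessOut_func : Int × Int := (40, 30)

-- ===== CLAIM =====
def Claim_unchanged_func : Prop := ∀ (dies : List Int), Dom_func dies → Pre_func dies → Spec_func dies (func dies)
def Claim_changed_func : Prop := Dom_func (pvDiffWitness_func) ∧ Pre_func (pvDiffWitness_func) ∧ D_func (pvDiffWitness_func) ∧ func (pvDiffWitness_func) = pvDiffWitnessOut_func.1 ∧ func_alt (pvDiffWitness_func) = pvDiffWitnessOut_func.2 ∧ pvDiffWitnessOut_func.1 ≠ pvDiffWitnessOut_func.2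
def Claim_exact_func : Prop := ∀ (dies : List Int), Dom_func dies → Pre_func dies → D_func dies → func dies ≠ func_alt dies

-- ===== LEMMAS AND PROOFS =====

theorem pyGet?_cons3_one (a b c : Int) (rest : List Int) :
    PySem.List.pyGet? (a :: b :: c :: rest) 1 = some b := by
  simp only [PySem.List.pyGet?, PySem.List.pyIdx?]
  split
  · split
    · simp
    · simp only [List.length_cons] at *; omega
  · omega

theorem pyGet?_cons3_two (a b c : Int) (rest : List Int) :
    PySem.List.pyGet? (a :: b :: c :: rest) 2 = some c := by
  simp only [PySem.List.pyGet?, PySem.List.pyIdx?]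
  split
  · split
    · simp
    · simp only [List.length_cons] at *; omega
  · omega

-- the inner scan leaves the accumulator untouched when i does not occur in l
theorem inner_foldl_not_mem (i : Int) (l : List Int) (r : Int) (h : i ∉ l) :
    l.foldl (fun result j => if i = j then 10 + i * 10 else result) r = r := by
  induction l generalizing r with
  | nil => rfl
  | cons x t ih =>
      simp only [List.mem_cons, not_or] at h
      simp [List.foldl_cons, if_neg h.1, ih _ h.2]

-- the inner scan over a list containing i always ends at 10 + i*10
theorem inner_foldl_mem (i : Int) (l : List Int) (r : Int) (h : i ∈ l) :
    l.foldl (fun result j => if i = j then 10 + i * 10 else result) r = 10 + i * 10 := by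
  induction l generalizing r with
  | nil => cases h
  | cons x t ih =>
      by_cases ht : i ∈ t
      · simp [List.foldl_cons, ih _ ht]
      · have hx : i = x := by
          rcases List.mem_cons.mp h with h' | h'
          · exact h'
          · exact absurd h' ht
        simp only [List.foldl_cons, if_pos hx]
        exact inner_foldl_not_mem i t _ ht

-- therefore A's outer loop always returns 10 + (last element)*10
theorem outer_foldl_eq_last (dies : List Int) (r : Int) (h : dies ≠ []) :
    dies.foldl (fun result i =>
        dies.foldl (fun result j => if i = j then 10 + i * 10 else result) result) r
      = 10 + (dies.getLast h) * 10 := by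
  have key : ∀ (l : List Int) (r : Int) (hl : l ≠ []), (∀ x ∈ l, x ∈ dies) →
      l.foldl (fun result i =>
        dies.foldl (fun result j => if i = j then 10 + i * 10 else result) result) r
        = 10 + (l.getLast hl) * 10 := by
    intro l
    induction l with
    | nil => intro r hl _; exact absurd rfl hl
    | cons x t ih =>
        intro r _ hsub
        cases t with
        | nil =>
            simp only [List.foldl_cons, List.foldl_nil, List.getLast_singleton]
            exact inner_foldl_mem x dies r (hsub x (by simp))
        | cons y s =>
            simp only [List.foldl_cons]
            rw [← List.foldl_cons]
            rw [ih _ (by simp) (fun z hz => hsub z (List.mem_cons_of_mem _ hz))]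
            simp [List.getLast]
  exact key dies r h (fun x hx => hx)

-- A's running-max loop equals Python's max(dies)
theorem max_loop_eq (a : Int) (t : List Int) :
    (a :: t).foldl (fun largest die => if die > largest then die else largest) a
      = (PySem.List.max? (a :: t) (fun x => x)).getD 0 := by
  rw [PySem.List.max?_id_cons]
  simp only [List.foldl_cons, Option.getD_some]
  have step : ∀ (l : List Int) (s : Int),
      l.foldl (fun largest die => if die > largest then die else largest) s
        = l.foldl max s := by
    intro l
    induction l with
    | nil => intro s; rfl
    | cons x u ih =>
        intro s
        simp only [List.foldl_cons, ih]
        congr 1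
        by_cases hx : x > s
        · simp [if_pos hx, max_eq_right (le_of_lt hx)]
        · simp [if_neg hx, max_eq_left (le_of_not_gt hx)]
  rw [if_neg (lt_irrefl a), step]

-- the getLast?.getD 0 in D_func is the last element
theorem lastD_eq (a b c : Int) (rest : List Int) :
    (a :: b :: c :: rest).getLast?.getD 0 = (a :: b :: c :: rest).getLast (by simp) := by
  have h := List.getLast?_eq_getLast (l := a :: b :: c :: rest) (by simp)
  rw [h]
  rfl

-- cardinality of the three-element set, by case analysis on the equalities
theorem set3_len_one (a b c : Int) (h1 : a = b) (h2 : b = c) :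
    PySem.Set.len (PySem.Set.ofList [a, b, c]) = 1 := by
  subst h1; subst h2
  simp [PySem.Set.ofList, PySem.Set.add, PySem.Set.len, PySem.Set.empty, PySem.Set.contains]

theorem set3_len_two (a b c : Int) (hne : ¬(a = b ∧ b = c)) (hp : a = b ∨ a = c ∨ b = c) :
    PySem.Set.len (PySem.Set.ofList [a, b, c]) = 2 := by
  simp only [PySem.Set.ofList, PySem.Set.add, PySem.Set.len, PySem.Set.empty,
    PySem.Set.contains, List.foldl_cons, List.foldl_nil]
  rcases hp with h | h | h
  · subst h
    have hac : a ≠ c := fun hc => hne ⟨rfl, hc⟩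
    simp [Ne.symm hac]
  · subst h
    have hab : a ≠ b := fun hb => hne ⟨hb, hb ▸ rfl⟩
    simp [Ne.symm hab, hab]
  · subst h
    have hab : a ≠ b := fun hb => hne ⟨hb, rfl⟩
    simp [Ne.symm hab]

theorem set3_len_three (a b c : Int) (hab : a ≠ b) (hac : a ≠ c) (hbc : b ≠ c) :
    PySem.Set.len (PySem.Set.ofList [a, b, c]) = 3 := by
  simp only [PySem.Set.ofList, PySem.Set.add, PySem.Set.len, PySem.Set.empty,
    PySem.Set.contains, List.foldl_cons, List.foldl_nil]
  simp [Ne.symm hab, Ne.symm hac, Ne.symm hbc]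

-- on the pair branch, B returns 10 + 10*(the paired value)
theorem func_alt_pair (a b c : Int) (rest : List Int)
    (hne : ¬(a = b ∧ b = c)) (hp : a = b ∨ a = c ∨ b = c) :
    func_alt (a :: b :: c :: rest) = 10 + 10 * (if a = b ∨ a = c then a else b) := by
  unfold func_alt
  simp only [PySem.List.pyGet?_zero_cons, pyGet?_cons3_one, pyGet?_cons3_two]
  rw [set3_len_two a b c hne hp]
  norm_num

-- on the pair branch, A returns 10 + (last element)*10
theorem func_pair (a b c : Int) (rest : List Int)
    (hne : ¬(a = b ∧ b = c)) (hp : a = b ∨ a = c ∨ b = c) :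
    func (a :: b :: c :: rest)
      = 10 + ((a :: b :: c :: rest).getLast?.getD 0) * 10 := by
  unfold func
  simp only [PySem.List.pyGet?_zero_cons, pyGet?_cons3_one, pyGet?_cons3_two]
  rw [if_neg hne, if_pos hp, lastD_eq]
  exact outer_foldl_eq_last _ _ (by simp)

-- ===== VERDICT =====
theorem func_spec : Claim_unchanged_func := by
  intro dies _ hpre hnd
  match dies, hpre with
  | a :: b :: c :: rest, _ =>
    by_cases h1 : a = b ∧ b = c
    · unfold func func_alt
      simp only [PySem.List.pyGet?_zero_cons, pyGet?_cons3_one, pyGet?_cons3_two]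
      rw [if_pos h1, set3_len_one a b c h1.1 h1.2]
      norm_num; ring
    · by_cases h2 : a = b ∨ a = c ∨ b = c
      · -- pair branch: ¬D_ forces the paired value to equal the last element
        rw [func_pair a b c rest h1 h2, func_alt_pair a b c rest h1 h2]
        unfold D_func at hnd
        rw [not_and] at hnd
        have hnd' := hnd (by simp)
        simp only [List.getD_cons_zero, List.getD_cons_succ] at hnd'
        by_cases hab : a = b
        · have hbc : b ≠ c := fun h => h1 ⟨hab, h⟩
          rw [if_pos hab] at hnd'
          have haL : a = (a :: b :: c :: rest).getLast?.getD 0 := by tauto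
          rw [if_pos (Or.inl hab)]
          omega
        · rw [if_neg hab] at hnd'
          have hor : a = c ∨ b = c := by tauto
          have hcL : c = (a :: b :: c :: rest).getLast?.getD 0 := by tauto
          by_cases hac : a = c
          · rw [if_pos (Or.inr hac)]; omega
          · rw [if_neg (by tauto)]
            have hbc : b = c := by tauto
            omega
      · push_neg at h2
        unfold func func_alt
        simp only [PySem.List.pyGet?_zero_cons, pyGet?_cons3_one, pyGet?_cons3_two]
        rw [if_neg h1, if_neg (by push_neg; exact h2),
          set3_len_three a b c h2.1 h2.2.1 h2.2.2,
          if_neg (by norm_num), if_neg (by norm_num), mul_one, max_loop_eq]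

theorem func_changed : Claim_changed_func := by unfold Claim_changed_func; decide

theorem func_tight : Claim_exact_func := by
  intro dies _ hpre hd
  match dies, hpre with
  | a :: b :: c :: rest, _ =>
    unfold D_func at hd
    obtain ⟨-, hd⟩ := hd
    simp only [List.getD_cons_zero, List.getD_cons_succ] at hd
    by_cases hab : a = b
    · rw [if_pos hab] at hd
      obtain ⟨hbc, haL⟩ := hd
      have h1 : ¬(a = b ∧ b = c) := fun h => hbc h.2
      rw [func_pair a b c rest h1 (Or.inl hab), func_alt_pair a b c rest h1 (Or.inl hab),
        if_pos (Or.inl hab)]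
      intro heq
      exact haL (by omega)
    · rw [if_neg hab] at hd
      obtain ⟨hor, hcL⟩ := hd
      have h1 : ¬(a = b ∧ b = c) := fun h => hab h.1
      have h2 : a = b ∨ a = c ∨ b = c := by tauto
      rw [func_pair a b c rest h1 h2, func_alt_pair a b c rest h1 h2]
      intro heq
      apply hcL
      have hpc : (if a = b ∨ a = c then a else b) = c := by
        by_cases hac : a = c
        · rw [if_pos (Or.inr hac)]; exact hac
        · rw [if_neg (by tauto)]; tauto
      rw [hpc] at heq
      omega
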